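-- pv_equiv track=rewrite | github.com/GeorgeBeshay/ProblemSolving | CF_Phase_2_1/Greedy/P427B_PrisonTransfer.py | TheAmazingFunction
-- ===== SOURCE A (Python) =====
-- def TheAmazingFunction(Arr: list, T_, C_):
--     B = Arr.copy()
--     temp = -C_
--     Ans = 0
--     Arr.reverse()
--     for i in range(0, len(Arr)):
--         if Arr[i] > T_:
--             B[i] = -C_
--             temp = -C_
--         else:
--             if temp == 0:
--                 B[i] = 0
--             else:
--                 B[i] = temp + 1
--                 temp += 1
--     for H in B:
--         if H == 0:
--             Ans += 1
--     return Ans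
-- ===== SOURCE B (Python) =====
-- def TheAmazingFunction(Arr: list, T_, C_):
--     # Reverses Arr in place like A; prefix-count table + window-difference scan.
--     Arr.reverse()
--     if C_ < 0:
--         return 0
--     P = [0]
--     for x in Arr:
--         P.append(P[-1] + (1 if x > T_ else 0))
--     return sum(1 for u, v in zip(P, P[C_:]) if u == v)
-- ===== Notes on version B (the rewrite author's own statement) =====
-- stated objective: alternative
-- what changed: Replaces A's capped running-counter plus marker-array-then-count-zeros decomposition with a prefix-count table and a window-difference scan (count positions where the prefix count of elements > T_ is unchanged across a window of length C_); Arr is still reversed in place like A.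
-- outside the precondition, e.g. on TheAmazingFunction([5], 0, 0): A returns 1, B returns 2
import Mathlib
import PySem

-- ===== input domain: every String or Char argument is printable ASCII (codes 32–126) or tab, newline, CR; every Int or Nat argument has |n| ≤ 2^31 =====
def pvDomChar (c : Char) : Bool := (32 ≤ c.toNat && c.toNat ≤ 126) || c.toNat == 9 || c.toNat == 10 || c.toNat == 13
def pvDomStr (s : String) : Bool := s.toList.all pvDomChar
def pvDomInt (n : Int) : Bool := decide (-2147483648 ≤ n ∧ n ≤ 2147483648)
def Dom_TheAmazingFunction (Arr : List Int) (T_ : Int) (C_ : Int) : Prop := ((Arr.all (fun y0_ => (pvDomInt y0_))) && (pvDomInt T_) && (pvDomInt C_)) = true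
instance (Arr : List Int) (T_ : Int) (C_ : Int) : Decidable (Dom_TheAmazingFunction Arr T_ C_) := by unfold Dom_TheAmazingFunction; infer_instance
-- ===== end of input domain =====

-- B replaces A's capped running-counter + marker-array + count-zeros decomposition with a
-- prefix-count table and a window-difference scan; both reverse Arr in place (equivalence is
-- about the return value; B performs the same reversal).

-- ===== PORT A =====
def TheAmazingFunction (Arr : List Int) (T_ : Int) (C_ : Int) : Int :=
  let B := Arr
  let Arr2 := Arr.reverse
  let st := Arr2.zipIdx.foldl (fun (st : List Int × Int) (p : Int × Nat) =>
      if p.1 > T_ then (st.1.set p.2 (-C_), -C_)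
      else if st.2 = 0 then (st.1.set p.2 0, st.2)
      else (st.1.set p.2 (st.2 + 1), st.2 + 1)) (B, -C_)
  st.1.foldl (fun Ans H => if H = 0 then Ans + 1 else Ans) 0

-- ===== PORT B =====
def pvStepB (T_ : Int) (P : List Int) (x : Int) : List Int :=
  P ++ [P.getLastD 0 + (if x > T_ then 1 else 0)]

def TheAmazingFunction_alt (Arr : List Int) (T_ : Int) (C_ : Int) : Int :=
  let Arr2 := Arr.reverse
  if C_ < 0 then 0
  else
    let P := Arr2.foldl (pvStepB T_) [0]
    (P.zip (PySem.List.slice P (some C_) none)).foldl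
      (fun acc p => if p.1 = p.2 then acc + 1 else acc) 0

-- ===== PRECONDITION & SPEC =====
-- Pre_ excludes only C_ = 0, a degenerate window size on which A's sentinel -C_ collides with
-- its zero marker so A returns len(Arr), while B counts the len(Arr)+1 empty windows; both
-- values are defensible accidents of a corner no one would specify.
def Pre_TheAmazingFunction (Arr : List Int) (T_ : Int) (C_ : Int) : Prop := C_ ≠ 0
instance (Arr : List Int) (T_ : Int) (C_ : Int) : Decidable (Pre_TheAmazingFunction Arr T_ C_) := by unfold Pre_TheAmazingFunction; infer_instance

def pvWitness_TheAmazingFunction : List Int × Int × Int := ([1, 3, 2, 1], 2, 2)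

def Spec_TheAmazingFunction (Arr : List Int) (T_ : Int) (C_ : Int) (out : Int) : Prop := out = TheAmazingFunction_alt Arr T_ C_
instance (Arr : List Int) (T_ : Int) (C_ : Int) (out : Int) : Decidable (Spec_TheAmazingFunction Arr T_ C_ out) := by unfold Spec_TheAmazingFunction; infer_instance

-- ===== CLAIM (what is proved, stated in full; the proofs are below) =====
def Claim_equal_TheAmazingFunction : Prop := ∀ (Arr : List Int) (T_ : Int) (C_ : Int), Dom_TheAmazingFunction Arr T_ C_ → Pre_TheAmazingFunction Arr T_ C_ → Spec_TheAmazingFunction Arr T_ C_ (TheAmazingFunction Arr T_ C_)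

-- ===== LEMMAS AND PROOFS =====

-- marker list and final temp produced by A's first loop
def marksT (T C : Int) : List Int → Int → List Int × Int
  | [], t => ([], t)
  | x :: xs, t =>
    if x > T then
      let r := marksT T C xs (-C); ((-C) :: r.1, r.2)
    else if t = 0 then
      let r := marksT T C xs t; (0 :: r.1, r.2)
    else
      let r := marksT T C xs (t + 1); ((t + 1) :: r.1, r.2)

-- zero count of the marker list, recursively (temp carried)
def zcN (C : Nat) : List Bool → Nat → Nat
  | [], _ => 0
  | b :: bs, r =>
    if b then
      if r = C then 1 + zcN C bs C
      else (if r + 1 = C then 1 else 0) + zcN C bs (r + 1)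
    else zcN C bs 0

-- number of all-valid windows of length C, counted by start position
def startsN (C : Nat) : List Bool → Nat
  | [] => 0
  | b :: bs => (if C ≤ (b :: bs).length ∧ ((b :: bs).take C).all id then 1 else 0) + startsN C bs

-- prefix-count list that B's first loop builds
def pfx (T : Int) (a : Int) : List Int → List Int
  | [] => [a]
  | x :: xs => a :: pfx T (a + if x > T then 1 else 0) xs

lemma take_set_succ : ∀ (B : List Int) (k : Nat) (v : Int), k < B.length →
    (B.set k v).take (k + 1) = B.take k ++ [v] := by
  intro B
  induction B with
  | nil => intro k v h; simp at h
  | cons b bs ih =>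
    intro k v h
    cases k with
    | zero => simp
    | succ k =>
      simp only [List.set_cons_succ, List.take_succ_cons, List.cons_append]
      rw [ih k v (by simpa using h)]

lemma foldA_eq (T C : Int) : ∀ (ys B : List Int) (t : Int) (k : Nat),
    B.length = k + ys.length →
    (ys.zipIdx k).foldl (fun (st : List Int × Int) (p : Int × Nat) =>
      if p.1 > T then (st.1.set p.2 (-C), -C)
      else if st.2 = 0 then (st.1.set p.2 0, st.2)
      else (st.1.set p.2 (st.2 + 1), st.2 + 1)) (B, t)
    = (B.take k ++ (marksT T C ys t).1, (marksT T C ys t).2) := by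
  intro ys
  induction ys with
  | nil =>
    intro B t k h
    have hB : B.length ≤ k := by simp at h; omega
    simp [marksT, List.take_of_length_le hB]
  | cons x xs ih =>
    intro B t k h
    have hk : k < B.length := by simp at h; omega
    simp only [List.zipIdx_cons, List.foldl_cons]
    by_cases hx : x > T
    · rw [if_pos hx]
      rw [ih (B.set k (-C)) (-C) (k + 1) (by simp at h ⊢; omega)]
      rw [take_set_succ B k (-C) hk]
      simp [marksT, hx, List.append_assoc]
    · rw [if_neg hx]
      by_cases ht : t = 0
      · simp only [ht, if_neg hx, eq_self_iff_true, if_true]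
        rw [ih (B.set k 0) 0 (k + 1) (by simp at h ⊢; omega)]
        rw [take_set_succ B k 0 hk]
        simp [marksT, hx, ht, List.append_assoc]
      · simp only [if_neg ht]
        rw [ih (B.set k (t + 1)) (t + 1) (k + 1) (by simp at h ⊢; omega)]
        rw [take_set_succ B k (t + 1) hk]
        simp [marksT, hx, ht, List.append_assoc]

lemma foldl_count {α : Type} (p : α → Prop) [DecidablePred p] :
    ∀ (l : List α) (a : Int),
    l.foldl (fun acc x => if p x then acc + 1 else acc) a = a + (l.countP (fun x => decide (p x)) : Int) := by
  intro l
  induction l with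
  | nil => intro a; simp
  | cons x xs ih =>
    intro a
    by_cases hx : p x
    · simp [hx, ih, List.countP_cons]
      omega
    · simp [hx, ih, List.countP_cons]

lemma startsN_small (C : Nat) : ∀ bs : List Bool, bs.length < C → startsN C bs = 0 := by
  intro bs
  induction bs with
  | nil => intro _; rfl
  | cons b bs ih =>
    intro h
    simp only [startsN]
    rw [if_neg (by simp at h ⊢; omega), ih (by simp at h; omega)]

lemma startsN_replicate (C : Nat) (hC : 1 ≤ C) : ∀ r, r ≤ C →
    startsN C (List.replicate r true) = if r = C then 1 else 0 := by
  intro r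
  induction r with
  | zero => intro _; simp [startsN]; omega
  | succ r ih =>
    intro hr
    simp only [List.replicate_succ, startsN]
    rw [ih (by omega)]
    have htake : ((true :: List.replicate r true).take C).all id = true := by
      have : (true :: List.replicate r true) = List.replicate (r+1) true := by
        simp [List.replicate_succ]
      rw [this, List.take_replicate]
      simp
    simp only [htake, List.length_cons, List.length_replicate, and_true]
    split_ifs <;> omega

lemma startsN_rep_false (C : Nat) (hC : 1 ≤ C) : ∀ r, r ≤ C → ∀ bs : List Bool,
    startsN C (List.replicate r true ++ false :: bs) = (if r = C then 1 else 0) + startsN C bs := by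
  intro r
  induction r with
  | zero =>
    intro _ bs
    obtain ⟨C', rfl⟩ : ∃ C', C = C' + 1 := ⟨C - 1, by omega⟩
    simp [startsN]
  | succ r ih =>
    intro hr bs
    simp only [List.replicate_succ, List.cons_append, startsN]
    rw [ih (by omega) bs, if_neg (by omega : ¬ r = C)]
    have hcond : (C ≤ (true :: (List.replicate r true ++ false :: bs)).length ∧
        ((true :: (List.replicate r true ++ false :: bs)).take C).all id) ↔ r + 1 = C := by
      constructor
      · rintro ⟨hlen, hall⟩
        by_contra hne
        have hlt : r + 1 < C := by omega
        have hmem : (false : Bool) ∈ (true :: (List.replicate r true ++ false :: bs)).take C := by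
          have heq : (true :: (List.replicate r true ++ false :: bs)) =
              (true :: List.replicate r true) ++ false :: bs := by simp
          rw [heq, List.take_append]
          refine List.mem_append_right _ ?_
          obtain ⟨n, hn⟩ : ∃ n, C - (true :: List.replicate r true).length = n + 1 := by
            refine ⟨C - (true :: List.replicate r true).length - 1, ?_⟩
            simp; omega
          rw [hn, List.take_succ_cons]
          exact List.mem_cons_self
        have := List.all_eq_true.mp hall _ hmem
        simp at this
      · intro he
        subst he
        constructor
        · simp only [List.length_cons, List.length_append, List.length_replicate]; omega
        · have : (true :: (List.replicate r true ++ false :: bs)) =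
              List.replicate (r+1) true ++ false :: bs := by simp [List.replicate_succ]
          rw [this, List.take_append, List.length_replicate, Nat.sub_self, List.take_zero,
            List.append_nil, List.take_replicate]
          simp
    by_cases hc : r + 1 = C
    · rw [if_pos (hcond.mpr hc), if_pos hc]; omega
    · rw [if_neg (fun h => hc (hcond.mp h)), if_neg hc]; omega

lemma startsN_rep_succ (C : Nat) (hC : 1 ≤ C) : ∀ bs : List Bool,
    startsN C (List.replicate (C + 1) true ++ bs) = 1 + startsN C (List.replicate C true ++ bs) := by
  intro bs
  conv_lhs => rw [List.replicate_succ, List.cons_append]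
  simp only [startsN]
  congr 1
  rw [if_pos]
  constructor
  · simp; omega
  · have : (true :: (List.replicate C true ++ bs)) = List.replicate (C + 1) true ++ bs := by
      simp [List.replicate_succ]
    rw [this, List.take_append, List.length_replicate, List.take_replicate]
    simp [Nat.min_eq_left (by omega : C ≤ C + 1), Nat.sub_eq_zero_of_le (by omega : C ≤ C + 1)]

lemma rep_true_cons (r : Nat) (bs : List Bool) :
    List.replicate r true ++ true :: bs = List.replicate (r + 1) true ++ bs := by
  rw [List.replicate_succ' , List.append_assoc]
  simp

lemma zc_eq_starts (C : Nat) (hC : 1 ≤ C) : ∀ (bs : List Bool) (r : Nat), r ≤ C →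
    zcN C bs r + (if r = C then 1 else 0) = startsN C (List.replicate r true ++ bs) := by
  intro bs
  induction bs with
  | nil =>
    intro r hr
    simp only [zcN, List.append_nil]
    rw [startsN_replicate C hC r hr]
    omega
  | cons b bs ih =>
    intro r hr
    cases b with
    | false =>
      have h0 := ih 0 (by omega)
      simp only [zcN, Bool.false_eq_true, if_false]
      rw [startsN_rep_false C hC r hr bs]
      simp only [List.replicate_zero, List.nil_append] at h0
      rw [if_neg (by omega : ¬ (0 : Nat) = C)] at h0
      omega
    | true =>
      by_cases hrc : r = C
      · subst hrc
        simp only [zcN, if_pos rfl, if_true]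
        rw [rep_true_cons, startsN_rep_succ r hC bs]
        have h := ih r (le_refl r)
        rw [if_pos rfl] at h
        omega
      · simp only [zcN, if_neg hrc, if_true]
        rw [rep_true_cons]
        have h := ih (r + 1) (by omega)
        split_ifs at h ⊢ <;> omega

lemma marks_count (T C : Int) (hC : 1 ≤ C) : ∀ (ys : List Int) (t : Int), -C ≤ t → t ≤ 0 →
    (marksT T C ys t).1.countP (fun H => decide (H = 0)) =
      zcN C.toNat (ys.map (fun x => decide (x ≤ T))) (t + C).toNat := by
  intro ys
  induction ys with
  | nil => intro t _ _; simp [marksT, zcN]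
  | cons x xs ih =>
    intro t h1 h2
    by_cases hx : x > T
    · simp only [marksT, if_pos hx, List.map_cons, List.countP_cons]
      rw [ih (-C) (by omega) (by omega)]
      have hb : decide (x ≤ T) = false := by simp; omega
      simp [hb, zcN, show (-C + C).toNat = 0 by omega, show ¬ ((-C : Int) = 0) by omega]
    · have hb : decide (x ≤ T) = true := by simp; omega
      by_cases ht : t = 0
      · subst ht
        simp only [marksT, if_neg hx, eq_self_iff_true, if_true, List.map_cons, List.countP_cons]
        rw [ih 0 (by omega) (by omega)]
        simp [hb, zcN]
        omega
      · simp only [marksT, if_neg hx, if_neg ht, List.map_cons, List.countP_cons]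
        rw [ih (t + 1) (by omega) (by omega)]
        have hr : ¬ (t + C).toNat = C.toNat := by omega
        simp only [hb, zcN, if_true, if_neg hr]
        have h3 : (t + 1 + C).toNat = (t + C).toNat + 1 := by omega
        rw [h3]
        by_cases hz : t + 1 = 0
        · rw [if_pos (by simpa using hz), if_pos (by omega : (t + C).toNat + 1 = C.toNat)]
          omega
        · rw [if_neg (by simpa using hz), if_neg (by omega : ¬ (t + C).toNat + 1 = C.toNat)]
          omega

lemma marks_count_neg (T C : Int) (hC : C ≤ -1) : ∀ (ys : List Int) (t : Int), 1 ≤ t →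
    (marksT T C ys t).1.countP (fun H => decide (H = 0)) = 0 := by
  intro ys
  induction ys with
  | nil => intro t _; simp [marksT]
  | cons x xs ih =>
    intro t ht
    by_cases hx : x > T
    · simp only [marksT, if_pos hx, List.countP_cons]
      rw [ih (-C) (by omega)]
      simp; omega
    · simp only [marksT, if_neg hx, if_neg (by omega : ¬ t = 0), List.countP_cons]
      rw [ih (t + 1) (by omega)]
      simp; omega

lemma getLastD_concat' (Q : List Int) (a : Int) : (Q ++ [a]).getLastD 0 = a := by
  simp [List.getLastD_eq_getLast?]

lemma foldP (T : Int) : ∀ (ys Q : List Int) (a : Int),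
    ys.foldl (pvStepB T) (Q ++ [a]) = Q ++ pfx T a ys := by
  intro ys
  induction ys with
  | nil => intro Q a; simp [pfx]
  | cons x xs ih =>
    intro Q a
    simp only [List.foldl_cons, pvStepB, getLastD_concat']
    rw [ih (Q ++ [a]) (a + if x > T then 1 else 0)]
    simp [pfx]

lemma pfx_length (T : Int) : ∀ (ys : List Int) (a : Int), (pfx T a ys).length = ys.length + 1 := by
  intro ys
  induction ys with
  | nil => intro a; simp [pfx]
  | cons x xs ih => intro a; simp [pfx, ih]

lemma pfx_get (T : Int) : ∀ (ys : List Int) (a : Int) (j : Nat), j ≤ ys.length →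
    (pfx T a ys)[j]? = some (a + ((ys.take j).countP (fun x => decide (T < x)) : Int)) := by
  intro ys
  induction ys with
  | nil =>
    intro a j hj
    have hj0 : j = 0 := by simpa using hj
    subst hj0
    simp [pfx]
  | cons x xs ih =>
    intro a j hj
    cases j with
    | zero => simp [pfx]
    | succ j =>
      simp only [pfx, List.getElem?_cons_succ]
      rw [ih (a + if x > T then 1 else 0) j (by simpa using hj)]
      simp only [List.take_succ_cons, List.countP_cons, decide_eq_true_eq, Option.some.injEq,
        gt_iff_lt]
      split_ifs with h <;> push_cast <;> omega

lemma zipcount (T : Int) (C : Nat) (hC : 1 ≤ C) : ∀ (ys : List Int) (a : Int),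
    ((pfx T a ys).zip ((pfx T a ys).drop C)).countP (fun p => decide (p.1 = p.2)) =
      startsN C (ys.map (fun x => decide (x ≤ T))) := by
  obtain ⟨C', rfl⟩ : ∃ C', C = C' + 1 := ⟨C - 1, by omega⟩
  intro ys
  induction ys with
  | nil =>
    intro a
    simp [pfx, startsN]
  | cons x xs ih =>
    intro a
    simp only [pfx, List.drop_succ_cons]
    cases hd : (pfx T (a + if x > T then 1 else 0) xs).drop C' with
    | nil =>
      have hlen0 := congrArg List.length hd
      rw [List.length_drop, pfx_length] at hlen0
      simp only [List.length_nil] at hlen0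
      have hsmall : (List.map (fun x => decide (x ≤ T)) (x :: xs)).length < C' + 1 := by
        simp; omega
      rw [startsN_small _ _ hsmall]
      simp
    | cons h tl =>
      have hlenR : C' < xs.length + 1 := by
        by_contra hk
        have hlen0 := congrArg List.length hd
        rw [List.length_drop, pfx_length] at hlen0
        simp at hlen0; omega
      have htl : tl = (pfx T (a + if x > T then 1 else 0) xs).drop (C' + 1) := by
        have h1 : ((pfx T (a + if x > T then 1 else 0) xs).drop C').tail =
            (pfx T (a + if x > T then 1 else 0) xs).drop (C' + 1) := by
          rw [← List.drop_one, List.drop_drop]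
        rw [← h1, hd, List.tail_cons]
      have hh : (pfx T (a + if x > T then 1 else 0) xs)[C']? = some h := by
        have h2 : ((pfx T (a + if x > T then 1 else 0) xs).drop C')[0]? = some h := by
          rw [hd]; rfl
        rwa [List.getElem?_drop, Nat.add_zero] at h2
      rw [pfx_get T xs (a + if x > T then 1 else 0) C' (by omega)] at hh
      have hhval : h = (a + if x > T then 1 else 0) +
          (((xs.take C').countP (fun y => decide (T < y)) : Nat) : Int) :=
        (Option.some.injEq _ _ ▸ hh).symm
      rw [List.zip_cons_cons, List.countP_cons, htl, ih (a + if x > T then 1 else 0)]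
      -- RHS one step of startsN
      conv_rhs => rw [List.map_cons, startsN]
      have hcond : (a = h) ↔ ((C' + 1 ≤ (decide (x ≤ T) :: List.map (fun x => decide (x ≤ T)) xs).length) ∧
          ((decide (x ≤ T) :: List.map (fun x => decide (x ≤ T)) xs).take (C' + 1)).all id = true) := by
        constructor
        · intro hah
          have hg : (if x > T then (1 : Int) else 0) +
              (((xs.take C').countP (fun y => decide (T < y)) : Nat) : Int) = 0 := by omega
          have hx : ¬ (x > T) := by
            by_contra hxx
            rw [if_pos hxx] at hg
            omega
          have hc0 : (xs.take C').countP (fun y => decide (T < y)) = 0 := by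
            rw [if_neg hx] at hg
            omega
          refine ⟨by simp; omega, ?_⟩
          rw [List.take_succ_cons, ← List.map_take]
          simp only [List.all_cons, List.all_map, Bool.and_eq_true, List.all_eq_true,
            Function.comp, id, decide_eq_true_eq]
          refine ⟨by omega, ?_⟩
          intro y hy
          have hy' := List.countP_eq_zero.mp hc0 y hy
          simp at hy'
          omega
        · rintro ⟨_, hall⟩
          rw [List.take_succ_cons, ← List.map_take, List.all_cons] at hall
          simp only [List.all_map, Bool.and_eq_true, List.all_eq_true, Function.comp, id,
            decide_eq_true_eq] at hall
          obtain ⟨hxb, hrest⟩ := hall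
          have hx : ¬ (x > T) := by omega
          have hc0 : (xs.take C').countP (fun y => decide (T < y)) = 0 := by
            rw [List.countP_eq_zero]
            intro y hy
            have hy2 := hrest y hy
            simp
            omega
          rw [hhval, if_neg hx, hc0]
          simp
      by_cases hah : a = h
      · rw [if_pos (by simpa using hah), if_pos (hcond.mp hah)]
        omega
      · rw [if_neg (by simpa using hah), if_neg (fun hc => hah (hcond.mpr hc))]
        omega

-- ===== VERDICT (by name: the statement is the Claim_ definition above) =====
lemma A_as_count (Arr : List Int) (T C : Int) :
    TheAmazingFunction Arr T C =
      ((marksT T C Arr.reverse (-C)).1.countP (fun H => decide (H = 0)) : Int) := by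
  simp only [TheAmazingFunction]
  rw [foldA_eq T C Arr.reverse Arr (-C) 0 (by simp)]
  simp only [List.take_zero, List.nil_append]
  rw [foldl_count (fun H : Int => H = 0)]
  simp

theorem TheAmazingFunction_spec : Claim_equal_TheAmazingFunction := by
  intro Arr T C _ hpre
  unfold Pre_TheAmazingFunction at hpre
  unfold Spec_TheAmazingFunction
  rw [A_as_count]
  by_cases hC : C < 0
  · simp only [TheAmazingFunction_alt, if_pos hC]
    rw [marks_count_neg T C (by omega) Arr.reverse (-C) (by omega)]
    simp
  · have hC1 : 1 ≤ C := by omega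
    simp only [TheAmazingFunction_alt, if_neg hC]
    have hP : Arr.reverse.foldl (pvStepB T) [0] = pfx T 0 Arr.reverse := by
      have h0 := foldP T Arr.reverse [] 0
      simpa using h0
    rw [hP]
    have hs : PySem.List.slice (pfx T 0 Arr.reverse) (some C) none =
        (pfx T 0 Arr.reverse).drop C.toNat := by
      have h1 : (C : Int) = ((C.toNat : Nat) : Int) := by omega
      conv_lhs => rw [h1]
      rw [PySem.List.slice_from_natCast]
    rw [hs]
    rw [foldl_count (fun p : Int × Int => p.1 = p.2)]
    rw [zipcount T C.toNat (by omega) Arr.reverse 0]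
    rw [marks_count T C hC1 Arr.reverse (-C) (by omega) (by omega)]
    have hz := zc_eq_starts C.toNat (by omega) (Arr.reverse.map (fun x => decide (x ≤ T))) 0 (by omega)
    rw [if_neg (by omega : ¬ (0 : Nat) = C.toNat)] at hz
    simp only [List.replicate_zero, List.nil_append] at hz
    have h0 : (-C + C).toNat = 0 := by omega
    rw [h0]
    omega
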